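-- pv_equiv track=rewrite | github.com/yoshi-huang/MusicGenrePredictor | backend/core/audio.py | apply_shift_and_transitions
-- ===== SOURCE A (Python) =====
-- def apply_shift_and_transitions(filtered: list, shift: int = 2) -> tuple:
--     """
--     Apply sliding-window lag compensation and mark transition seconds.
--
--     Returns (filtered, tagged):
--       - filtered : shift-corrected sequence (int genre indices), used for vote counts
--       - tagged   : same but with -1 at each boundary second (prev & next), used for display
--     """
--     if len(filtered) > shift:
--         filtered = filtered[shift:] + [filtered[-1]] * shift
--
--     tagged = list(filtered)
--     for i in range(1, len(filtered)):
--         if filtered[i] != filtered[i - 1]: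
--             tagged[i - 1] = -1
--             tagged[i]     = -1
--     return filtered, tagged
-- ===== SOURCE B (Python) =====
-- def apply_shift_and_transitions(filtered: list, shift: int = 2) -> tuple:
--     if len(filtered) > shift:
--         filtered = filtered[shift:] + [filtered[-1]] * shift
--     n = len(filtered)
--     tagged = [
--         -1 if ((j > 0 and filtered[j] != filtered[j - 1])
--                or (j + 1 < n and filtered[j + 1] != filtered[j]))
--         else filtered[j]
--         for j in range(n)
--     ]
--     return filtered, tagged
-- ===== Notes on version B (the rewrite author's own statement) =====
-- stated objective: alternative
-- what changed: Replaces A's loop that mutates a copy of the list (writing -1 at positions i-1 and i at each transition) with a single element-centric pass that builds tagged fresh: position j becomes -1 iff it differs from its left or right neighbour.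
import Mathlib
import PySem

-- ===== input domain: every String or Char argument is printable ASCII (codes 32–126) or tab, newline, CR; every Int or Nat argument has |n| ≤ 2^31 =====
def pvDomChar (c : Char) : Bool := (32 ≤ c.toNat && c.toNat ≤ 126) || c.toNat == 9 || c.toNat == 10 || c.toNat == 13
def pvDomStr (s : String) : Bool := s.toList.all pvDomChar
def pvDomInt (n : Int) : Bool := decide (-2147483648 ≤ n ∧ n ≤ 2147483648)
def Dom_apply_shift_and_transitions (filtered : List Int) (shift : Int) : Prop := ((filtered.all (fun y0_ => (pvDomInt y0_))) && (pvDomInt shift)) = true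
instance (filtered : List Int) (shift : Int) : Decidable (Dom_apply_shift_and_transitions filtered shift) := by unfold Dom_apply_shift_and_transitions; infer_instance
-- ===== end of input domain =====

-- B replaces A's mutating edge-marking loop by a single element-centric pass
-- (tagged[j] = -1 iff j differs from a neighbour); objective: alternative decomposition, same cost.


-- ===== PORT A =====
-- the shift line 'if len(filtered) > shift: filtered = filtered[shift:] + [filtered[-1]] * shift'
-- is verbatim identical in A and B, ported once; 'filtered[-1]' raises IndexError exactly on []
-- with shift < 0 — excluded by Pre_ — where the port's 'none' branch is never reached.
def pvShiftStep (filtered : List Int) (shift : Int) : List Int :=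
  if shift < (filtered.length : Int) then
    match PySem.List.pyGet? filtered (-1) with
    | some last => PySem.List.slice filtered (some shift) none ++ List.replicate shift.toNat last
    | none => []  -- Python raises IndexError here ([] with shift < 0); excluded by Pre_
  else filtered

def apply_shift_and_transitions (filtered : List Int) (shift : Int) : List Int × List Int :=
  let f := pvShiftStep filtered shift
  let tagged := (PySem.List.pyRange 1 (f.length : Int) 1).foldl
    (fun t i =>
      if PySem.List.pyGetD f i 0 ≠ PySem.List.pyGetD f (i - 1) 0 then
        (t.set (i - 1).toNat (-1)).set i.toNat (-1)
      else t) f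
  (f, tagged)

-- ===== PORT B =====
def apply_shift_and_transitions_alt (filtered : List Int) (shift : Int) : List Int × List Int :=
  let f := pvShiftStep filtered shift
  let n : Int := (f.length : Int)
  let tagged := (PySem.List.pyRange 0 n 1).map (fun j =>
    if (0 < j ∧ PySem.List.pyGetD f j 0 ≠ PySem.List.pyGetD f (j - 1) 0)
        ∨ (j + 1 < n ∧ PySem.List.pyGetD f (j + 1) 0 ≠ PySem.List.pyGetD f j 0)
    then -1 else PySem.List.pyGetD f j 0)
  (f, tagged)

-- ===== PRECONDITION & SPEC =====
-- Pre_ excludes exactly the inputs on which the Python A raises IndexError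
-- (the empty list with shift < 0, where 'filtered[-1]' is evaluated); B raises there too.
def Pre_apply_shift_and_transitions (filtered : List Int) (shift : Int) : Prop :=
  filtered ≠ [] ∨ 0 ≤ shift
instance (filtered : List Int) (shift : Int) : Decidable (Pre_apply_shift_and_transitions filtered shift) := by unfold Pre_apply_shift_and_transitions; infer_instance
def pvWitness_apply_shift_and_transitions : List Int × Int := ([3, 3, 1, 1, 2], 2)

def Spec_apply_shift_and_transitions (filtered : List Int) (shift : Int) (out : List Int × List Int) : Prop := out = apply_shift_and_transitions_alt filtered shift
instance (filtered : List Int) (shift : Int) (out : List Int × List Int) : Decidable (Spec_apply_shift_and_transitions filtered shift out) := by unfold Spec_apply_shift_and_transitions; infer_instance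

-- ===== CLAIM (what is proved, stated in full; the proofs are below) =====
def Claim_equal_apply_shift_and_transitions : Prop := ∀ (filtered : List Int) (shift : Int), Dom_apply_shift_and_transitions filtered shift → Pre_apply_shift_and_transitions filtered shift → Spec_apply_shift_and_transitions filtered shift (apply_shift_and_transitions filtered shift)

-- ===== LEMMAS AND PROOFS =====

-- A's loop body at natural index k (Python loop variable i = k + 1); reads f, writes t.
def pvStep (f t : List Int) (k : Nat) : List Int :=
  if f.getD (k + 1) 0 ≠ f.getD k 0 then (t.set k (-1)).set (k + 1) (-1) else t

-- which positions carry -1 after the first m iterations of A's loop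
abbrev pvCond (f : List Int) (m j : Nat) : Prop :=
  (0 < j ∧ j ≤ m ∧ f.getD j 0 ≠ f.getD (j - 1) 0) ∨ (j < m ∧ f.getD (j + 1) 0 ≠ f.getD j 0)

theorem pv_getD_set (l : List Int) (i j : Nat) (a : Int) :
    (l.set i a).getD j 0 = if i = j ∧ j < l.length then a else l.getD j 0 := by
  simp only [List.getD_eq_getElem?_getD, List.getElem?_set]
  by_cases hij : i = j
  · subst hij
    by_cases hl : i < l.length
    · simp [hl]
    · simp [hl]
  · simp [hij]

theorem pv_inv (f : List Int) (m : Nat) (hm : m + 1 ≤ f.length) :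
    ((List.range m).foldl (pvStep f) f).length = f.length ∧
      ∀ j : Nat, ((List.range m).foldl (pvStep f) f).getD j 0 =
        if pvCond f m j then -1 else f.getD j 0 := by
  induction m with
  | zero =>
    refine ⟨rfl, fun j => ?_⟩
    have h0 : ¬ pvCond f 0 j := by unfold pvCond; omega
    rw [if_neg h0]
    rfl
  | succ m ih =>
    obtain ⟨ihlen, ihval⟩ := ih (by omega)
    rw [List.range_succ, List.foldl_append]
    simp only [List.foldl_cons, List.foldl_nil]
    generalize hT : (List.range m).foldl (pvStep f) f = T at ihlen ihval ⊢
    unfold pvStep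
    split_ifs with h
    · refine ⟨by simp [ihlen], fun j => ?_⟩
      rw [pv_getD_set, pv_getD_set]
      simp only [List.length_set, ihlen, ihval]
      by_cases hj1 : j = m + 1
      · have hc : pvCond f (m + 1) j := by
          refine Or.inl ⟨by omega, by omega, ?_⟩
          rw [hj1]
          simpa using h
        rw [if_pos ⟨hj1.symm, by omega⟩, if_pos hc]
      · by_cases hj0 : j = m
        · have hc : pvCond f (m + 1) j := by
            refine Or.inr ⟨by omega, ?_⟩
            rw [hj0]
            exact h
          rw [if_neg (fun hx => hj1 hx.1.symm), if_pos ⟨hj0.symm, by omega⟩, if_pos hc]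
        · have hiff : pvCond f (m + 1) j ↔ pvCond f m j := by
            unfold pvCond
            constructor <;> rintro (⟨a, b, c⟩ | ⟨a, b⟩)
            · exact Or.inl ⟨a, by omega, c⟩
            · exact Or.inr ⟨by omega, b⟩
            · exact Or.inl ⟨a, by omega, c⟩
            · exact Or.inr ⟨by omega, b⟩
          rw [if_neg (fun hx => hj1 hx.1.symm), if_neg (fun hx => hj0 hx.1.symm)]
          simp only [hiff]
    · refine ⟨ihlen, fun j => ?_⟩
      rw [ihval]
      have hiff : pvCond f (m + 1) j ↔ pvCond f m j := by
        unfold pvCond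
        constructor <;> rintro (⟨a, b, c⟩ | ⟨a, b⟩)
        · refine Or.inl ⟨a, ?_, c⟩
          rcases Nat.lt_or_ge j (m + 1) with h' | h'
          · omega
          · exfalso
            have hj : j = m + 1 := by omega
            subst hj
            exact c (by simpa using h)
        · refine Or.inr ⟨?_, b⟩
          rcases Nat.lt_or_ge j m with h' | h'
          · omega
          · exfalso
            have hj : j = m := by omega
            subst hj
            exact b (by simpa using h)
        · exact Or.inl ⟨a, by omega, c⟩
        · exact Or.inr ⟨by omega, b⟩
      simp only [hiff]

-- A's Int-indexed loop over range(1, n) is the Nat-indexed pvStep fold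
theorem pv_foldA (f : List Int) :
    (PySem.List.pyRange 1 (f.length : Int) 1).foldl
        (fun t i =>
          if PySem.List.pyGetD f i 0 ≠ PySem.List.pyGetD f (i - 1) 0 then
            (t.set (i - 1).toNat (-1)).set i.toNat (-1)
          else t) f
      = (List.range (f.length - 1)).foldl (pvStep f) f := by
  rw [PySem.List.pyRange_one, List.foldl_map]
  have hlen : ((f.length : Int) - 1).toNat = f.length - 1 := by omega
  rw [hlen]
  congr 1
  funext t k
  have h2 : (1 : Int) + (k : Int) - 1 = ((k : Nat) : Int) := by omega
  have h1 : (1 : Int) + (k : Int) = ((k + 1 : Nat) : Int) := by omega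
  rw [h2, h1]
  simp only [PySem.List.pyGetD_natCast, Int.toNat_natCast, pvStep]

-- B's tagged list equals the final state of A's loop
theorem pv_tagged_eq (f : List Int) :
    (List.range (f.length - 1)).foldl (pvStep f) f
      = (PySem.List.pyRange 0 (f.length : Int) 1).map (fun j =>
          if (0 < j ∧ PySem.List.pyGetD f j 0 ≠ PySem.List.pyGetD f (j - 1) 0)
              ∨ (j + 1 < (f.length : Int) ∧ PySem.List.pyGetD f (j + 1) 0 ≠ PySem.List.pyGetD f j 0)
          then -1 else PySem.List.pyGetD f j 0) := by
  rcases Nat.eq_zero_or_pos f.length with h0 | hpos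
  · have hnil : f = [] := List.length_eq_zero_iff.mp h0
    subst hnil
    simp [PySem.List.pyRange_one_eq_nil]
  · obtain ⟨hlen, hval⟩ := pv_inv f (f.length - 1) (by omega)
    apply List.ext_getElem
    · rw [hlen, List.length_map, PySem.List.length_pyRange_one]
      omega
    · intro j hj1 hj2
      have hjn : j < f.length := by rwa [hlen] at hj1
      have hL : ((List.range (f.length - 1)).foldl (pvStep f) f)[j] =
          if pvCond f (f.length - 1) j then -1 else f.getD j 0 := by
        rw [← List.getD_eq_getElem _ 0 hj1, hval j]
      rw [hL]
      simp only [List.getElem_map, PySem.List.getElem_pyRange_one, zero_add]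
      have e1 : PySem.List.pyGetD f (j : Int) 0 = f.getD j 0 := PySem.List.pyGetD_natCast f j 0
      have e2 : PySem.List.pyGetD f ((j : Int) + 1) 0 = f.getD (j + 1) 0 := by
        have hc : ((j : Int) + 1) = ((j + 1 : Nat) : Int) := by omega
        rw [hc]
        exact PySem.List.pyGetD_natCast f (j + 1) 0
      have hiff : ((0 < (j : Int) ∧ PySem.List.pyGetD f (j : Int) 0 ≠ PySem.List.pyGetD f ((j : Int) - 1) 0)
          ∨ ((j : Int) + 1 < (f.length : Int) ∧ PySem.List.pyGetD f ((j : Int) + 1) 0 ≠ PySem.List.pyGetD f (j : Int) 0))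
          ↔ pvCond f (f.length - 1) j := by
        unfold pvCond
        rw [e1, e2]
        constructor
        · rintro (⟨a, c⟩ | ⟨a, b⟩)
          · have hj0 : 0 < j := by exact_mod_cast a
            have e3 : ((j : Int) - 1) = ((j - 1 : Nat) : Int) := by omega
            rw [e3, PySem.List.pyGetD_natCast] at c
            exact Or.inl ⟨hj0, by omega, c⟩
          · exact Or.inr ⟨by omega, b⟩
        · rintro (⟨a, b, c⟩ | ⟨a, b⟩)
          · have e3 : ((j : Int) - 1) = ((j - 1 : Nat) : Int) := by omega
            refine Or.inl ⟨by exact_mod_cast a, ?_⟩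
            rw [e3, PySem.List.pyGetD_natCast]
            exact c
          · exact Or.inr ⟨by omega, b⟩
      simp only [hiff]
      rw [e1]

-- ===== VERDICT (by name: the statement is the Claim_ definition above) =====
theorem apply_shift_and_transitions_spec : Claim_equal_apply_shift_and_transitions := by
  intro filtered shift _ _
  unfold Spec_apply_shift_and_transitions
  unfold apply_shift_and_transitions apply_shift_and_transitions_alt
  dsimp only
  rw [pv_foldA, pv_tagged_eq]
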